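-- pv_equiv track=rewrite | github.com/nhathuy13598/Khai-thac-luat-ket-hop | Source/LY THUYET/Apriori.py | has_infrequent_subset
-- ===== SOURCE A (Python) =====
-- def generate_subset(set,origin_id:str, id:str, index, size):
--     if len(id) == size:
--         set.append(id)
--         return
--     for c in range(index,len(origin_id)):
--         if origin_id[c] not in id:
--             id += origin_id[c]
--             generate_subset(set,origin_id, id, c + 1, size)
--             id = id[:-1]
--
-- def has_infrequent_subset(id:str, L_ksub1:dict):
--     '''
--     Kiem tra xem cac subset cua id co thuoc L_ksub1 hay khong
--     Ta se tao cac subset cua id bang ham generate_subset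
--     :param id: Day cac ten item
--     :param L_ksub1: Cac frequent (k-1) itemset
--     :return: True neu co tap khong pho bien trong id, False neu khong ton tai tap khong pho bien trong d
--     '''
--     subset = []
--     size = len(id) - 1
--     generate_subset(subset, id, '', 0, size)
--     for i in subset:
--         if i not in L_ksub1.keys():
--             return True
--     return False
-- ===== SOURCE B (Python) =====
-- def has_infrequent_subset(id: str, L_ksub1: dict):
--     # Iterative worklist version: explicit stack of (partial_subset, next_index)
--     # states replaces the recursive generator, and membership in L_ksub1 is
--     # checked as soon as a (k-1)-subset is completed (early return) instead of
--     # materializing the full subset list first.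
--     target = len(id) - 1
--     stack = [("", 0)]
--     while stack:
--         partial, start = stack.pop()
--         if len(partial) == target:
--             if partial not in L_ksub1:
--                 return True
--             continue
--         for c in range(start, len(id)):
--             if id[c] not in partial:
--                 stack.append((partial + id[c], c + 1))
--     return False
-- ===== Notes on version B (the rewrite author's own statement) =====
-- stated objective: alternative
-- what changed: The recursive subset generator that materializes the whole list of (k-1)-subsets before a separate membership scan is replaced by an explicit iterative worklist of (partial, next_index) states that checks each completed subset immediately and returns True early, keeping A's distinct-character guard.
import Mathlib
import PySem

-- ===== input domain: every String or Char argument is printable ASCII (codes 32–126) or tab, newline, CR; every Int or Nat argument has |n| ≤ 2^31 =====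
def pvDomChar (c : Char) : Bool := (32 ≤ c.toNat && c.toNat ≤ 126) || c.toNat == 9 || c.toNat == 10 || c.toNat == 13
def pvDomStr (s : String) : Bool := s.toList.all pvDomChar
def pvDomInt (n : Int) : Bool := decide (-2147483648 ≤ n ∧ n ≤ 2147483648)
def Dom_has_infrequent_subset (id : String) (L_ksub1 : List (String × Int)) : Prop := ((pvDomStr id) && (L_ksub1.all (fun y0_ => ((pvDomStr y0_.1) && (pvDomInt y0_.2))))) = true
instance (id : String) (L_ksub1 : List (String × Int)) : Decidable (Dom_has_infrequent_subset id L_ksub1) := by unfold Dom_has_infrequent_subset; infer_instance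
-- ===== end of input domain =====

-- B replaces A's recursive generator (build the full (k-1)-subset list, then scan it)
-- by an explicit iterative worklist of (partial, next_index) states with early exit.

-- ===== PORT A =====
-- generate_subset: `(origin_id, index)` is carried as the suffix `origin_id[index:]`
-- (the loop `for c in range(index, len(origin_id))` walks exactly that suffix, and the
-- recursive call continues after the chosen character).  To obtain structural recursion
-- the recursive call `generate_subset(set, origin_id, id, c+1, size)` is inlined by one
-- step (its entry check `if len(id) == size`); the values computed are identical.
def pvGenLoop (rest : List Char) (idp : List Char) (size : Int) : List (List Char) :=
  match rest with
  | [] => []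
  | c :: rs =>
    (if idp.contains c then []
     else if ((idp.length : Int) + 1 = size) then [idp ++ [c]]
     else pvGenLoop rs (idp ++ [c]) size) ++ pvGenLoop rs idp size

-- entry check `if len(id) == size: set.append(id); return`, then the loop
def pvGenA (rest : List Char) (idp : List Char) (size : Int) : List (List Char) :=
  if (idp.length : Int) = size then [idp]
  else pvGenLoop rest idp size

def has_infrequent_subset (id : String) (L_ksub1 : List (String × Int)) : Bool :=
  let subset := pvGenA id.toList [] ((id.toList.length : Int) - 1)
  -- `for i in subset: if i not in L_ksub1.keys(): return True` / `return False`
  subset.any (fun i => !(L_ksub1.any (fun kv => kv.1 == String.ofList i)))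

-- ===== PORT B =====
-- the inner `for c in range(start, len(id))` push loop, walking the suffix `id[start:]`
-- with `s` tracking the running index; the Lean list's head is the Python stack's top
-- (last appended = largest c), so later pushes are consed on top.
def pvPushAux (rem : List Char) (p : List Char) (s : Nat) (acc : List (List Char × Nat)) :
    List (List Char × Nat) :=
  match rem with
  | [] => acc
  | c :: rs =>
    if p.contains c then pvPushAux rs p (s + 1) acc
    else pvPushAux rs p (s + 1) ((p ++ [c], s + 1) :: acc)

-- the `while stack:` loop (pop = head, since the head is the top of the stack).
-- `fuel` is only a structural totality guard: the caller passes 2^(len+1), which is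
-- proved sufficient below (pvLoopF_sound), so the 0-fuel branch is never reached there.
def pvLoopF (idc : List Char) (target : Int) (L_ksub1 : List (String × Int)) :
    Nat → List (List Char × Nat) → Bool
  | _, [] => false
  | 0, _ :: _ => false
  | fuel + 1, (p, s) :: rest =>
    if (p.length : Int) = target then
      if L_ksub1.all (fun kv => kv.1 != String.ofList p) then true
      else pvLoopF idc target L_ksub1 fuel rest
    else pvLoopF idc target L_ksub1 fuel (pvPushAux (idc.drop s) p s rest)

def has_infrequent_subset_alt (id : String) (L_ksub1 : List (String × Int)) : Bool :=
  pvLoopF id.toList ((id.toList.length : Int) - 1) L_ksub1 (2 ^ (id.toList.length + 1)) [([], 0)]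

-- ===== PRECONDITION & SPEC =====
def Spec_has_infrequent_subset (id : String) (L_ksub1 : List (String × Int)) (out : Bool) : Prop := out = has_infrequent_subset_alt id L_ksub1
instance (id : String) (L_ksub1 : List (String × Int)) (out : Bool) : Decidable (Spec_has_infrequent_subset id L_ksub1 out) := by unfold Spec_has_infrequent_subset; infer_instance

-- ===== CLAIM (what is proved, stated in full; the proofs are below) =====
def Claim_equal_has_infrequent_subset : Prop := ∀ (id : String) (L_ksub1 : List (String × Int)), Dom_has_infrequent_subset id L_ksub1 → Spec_has_infrequent_subset id L_ksub1 (has_infrequent_subset id L_ksub1)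

-- ===== LEMMAS AND PROOFS =====

-- the two membership tests agree: `all (≠)` is `not any (=)`
theorem pv_pred_eq (L : List (String × Int)) (i : List Char) :
    (L.all (fun kv => kv.1 != String.ofList i)) = !(L.any (fun kv => kv.1 == String.ofList i)) := by
  induction L with
  | nil => rfl
  | cons kv tl ih =>
    simp only [bne] at ih
    simp [List.all_cons, List.any_cons, Bool.not_or, ih, bne]

-- the loop body's inlined step is exactly a generate_subset call
theorem pvGenLoop_cons (c : Char) (rs : List Char) (idp : List Char) (size : Int) :
    pvGenLoop (c :: rs) idp size
      = (if idp.contains c then [] else pvGenA rs (idp ++ [c]) size) ++ pvGenLoop rs idp size := by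
  rw [pvGenLoop, pvGenA]
  by_cases hc : idp.contains c
  · rw [if_pos hc, if_pos hc]
  · rw [if_neg hc, if_neg hc]
    have : ((idp ++ [c]).length : Int) = (idp.length : Int) + 1 := by
      simp [List.length_append]
    rw [this]

-- value of one worklist state: whether the subtree of subsets below it contains a miss
def pvT (idc : List Char) (target : Int) (L : List (String × Int)) (st : List Char × Nat) : Bool :=
  (pvGenA (idc.drop st.2) st.1 target).any (fun i => L.all (fun kv => kv.1 != String.ofList i))

-- worklist weight: the termination measure the supplied fuel dominates
def pvM (idc : List Char) (stack : List (List Char × Nat)) : Nat :=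
  (stack.map (fun st => 2 ^ (idc.length + 1 - st.2))).sum

theorem pvPushAux_sum (idc p : List Char) :
    ∀ (rem : List Char) (s : Nat) (acc : List (List Char × Nat)),
      s + rem.length ≤ idc.length →
      pvM idc (pvPushAux rem p s acc) + 2 ≤ 2 ^ (idc.length + 1 - s) + pvM idc acc := by
  intro rem
  induction rem with
  | nil =>
    intro s acc hs
    have h2 : 2 ≤ 2 ^ (idc.length + 1 - s) := by
      calc 2 = 2 ^ 1 := rfl
        _ ≤ 2 ^ (idc.length + 1 - s) := Nat.pow_le_pow_right (by omega) (by omega)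
    simpa [pvPushAux] using by omega
  | cons c rs ih =>
    intro s acc hs
    have hs' : s + 1 + rs.length ≤ idc.length := by simp at hs; omega
    have hpow : idc.length + 1 - s = (idc.length + 1 - (s + 1)) + 1 := by
      simp at hs; omega
    rw [pvPushAux]
    by_cases hc : p.contains c
    · rw [if_pos hc]
      have := ih (s + 1) acc hs'
      rw [hpow, pow_succ]
      have h1 : 1 ≤ 2 ^ (idc.length + 1 - (s + 1)) := Nat.one_le_two_pow
      omega
    · rw [if_neg hc]
      have := ih (s + 1) ((p ++ [c], s + 1) :: acc) hs'
      simp only [pvM, List.map_cons, List.sum_cons] at this ⊢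
      rw [hpow, pow_succ]
      omega

theorem pvPushAux_any (idc p : List Char) (target : Int) (L : List (String × Int)) :
    ∀ (n s : Nat) (acc : List (List Char × Nat)), idc.length - s = n →
      (pvPushAux (idc.drop s) p s acc).any (pvT idc target L)
        = (((pvGenLoop (idc.drop s) p target).any
              (fun i => L.all (fun kv => kv.1 != String.ofList i)))
            || acc.any (pvT idc target L)) := by
  intro n
  induction n with
  | zero =>
    intro s acc hn
    rw [List.drop_of_length_le (by omega), pvPushAux, pvGenLoop]
    simp
  | succ m ih =>
    intro s acc hn
    have hs : s < idc.length := by omega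
    rw [List.drop_eq_getElem_cons hs, pvPushAux, pvGenLoop_cons]
    by_cases hc : p.contains idc[s]
    · rw [if_pos hc, if_pos hc]
      simpa using ih (s + 1) acc (by omega)
    · rw [if_neg hc, if_neg hc]
      rw [ih (s + 1) ((p ++ [idc[s]], s + 1) :: acc) (by omega)]
      simp only [List.any_cons, List.any_append, pvT]
      cases (pvGenLoop (idc.drop (s + 1)) p target).any _ <;>
        cases (pvGenA (idc.drop (s + 1)) (p ++ [idc[s]]) target).any _ <;>
          cases acc.any (pvT idc target L) <;> rfl

theorem pvLoopF_sound (idc : List Char) (target : Int) (L : List (String × Int)) :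
    ∀ (fuel : Nat) (stack : List (List Char × Nat)), pvM idc stack ≤ fuel →
      pvLoopF idc target L fuel stack = stack.any (pvT idc target L) := by
  intro fuel
  induction fuel with
  | zero =>
    intro stack hM
    match stack with
    | [] => rfl
    | (p, s) :: rest =>
      exfalso
      have h1 : 1 ≤ 2 ^ (idc.length + 1 - s) := Nat.one_le_two_pow
      simp only [pvM, List.map_cons, List.sum_cons] at hM
      omega
  | succ f ih =>
    intro stack hM
    match stack with
    | [] => rfl
    | (p, s) :: rest =>
      have hw : 1 ≤ 2 ^ (idc.length + 1 - s) := Nat.one_le_two_pow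
      have hM' : 2 ^ (idc.length + 1 - s) + pvM idc rest ≤ f + 1 := by
        simpa [pvM] using hM
      rw [pvLoopF]
      by_cases hlen : (p.length : Int) = target
      · rw [if_pos hlen]
        have hT : pvT idc target L (p, s)
            = L.all (fun kv => kv.1 != String.ofList p) := by
          rw [pvT, pvGenA, if_pos hlen, List.any_cons, List.any_nil, Bool.or_false]
        by_cases hp : L.all (fun kv => kv.1 != String.ofList p)
        · rw [if_pos hp, List.any_cons, hT, hp, Bool.true_or]
        · rw [if_neg hp, List.any_cons, hT, Bool.eq_false_iff.mpr hp, Bool.false_or]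
          exact ih rest (by omega)
      · rw [if_neg hlen]
        have hrec : pvM idc (pvPushAux (idc.drop s) p s rest) ≤ f := by
          by_cases hs : s ≤ idc.length
          · have := pvPushAux_sum idc p (idc.drop s) s rest
              (by simp [List.length_drop]; omega)
            omega
          · rw [List.drop_of_length_le (by omega), pvPushAux]
            omega
        rw [ih _ hrec, pvPushAux_any idc p target L (idc.length - s) s rest rfl]
        rw [List.any_cons]
        have : pvT idc target L (p, s)
            = (pvGenLoop (idc.drop s) p target).any
                (fun i => L.all (fun kv => kv.1 != String.ofList i)) := by
          rw [pvT, pvGenA, if_neg hlen]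
        rw [this]

theorem pv_any_congr {α : Type} (l : List α) (f g : α → Bool) (h : ∀ a, f a = g a) :
    l.any f = l.any g := by
  induction l with
  | nil => rfl
  | cons a tl ih => simp [List.any_cons, h, ih]

-- ===== VERDICT (by name: the statement is the Claim_ definition above) =====
theorem has_infrequent_subset_spec : Claim_equal_has_infrequent_subset := by
  intro id L _
  unfold Spec_has_infrequent_subset has_infrequent_subset has_infrequent_subset_alt
  rw [pvLoopF_sound _ _ _ _ _ (by simp [pvM])]
  simp only [List.any_cons, List.any_nil, Bool.or_false, pvT, List.drop_zero]
  exact pv_any_congr _ _ _ (fun i => (pv_pred_eq L i).symm)
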